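-- pv_equiv track=rewrite | github.com/UIC-InDeXLab/FCS | generateLPParams.py | shortestDistanceOverAnEdge
-- ===== SOURCE A (Python) =====
-- def shortestDistanceOverAnEdge(edgeNodeDistances):
--     res = {}
--     for edge in edgeNodeDistances:
--         for node in edgeNodeDistances[edge]:
--             if node not in res:
--                 res[node] = edgeNodeDistances[edge][node]
--             elif edgeNodeDistances[edge][node] < res[node]:
--                 res[node] = edgeNodeDistances[edge][node]
--     return res
-- ===== SOURCE B (Python) =====
-- def shortestDistanceOverAnEdge(edgeNodeDistances):
--     # group all distances by node, then take the min of each group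
--     groups = {}
--     for edge in edgeNodeDistances:
--         inner = edgeNodeDistances[edge]
--         for node in inner:
--             groups.setdefault(node, []).append(inner[node])
--     return {node: min(ds) for node, ds in groups.items()}
-- ===== Notes on version B (the rewrite author's own statement) =====
-- stated objective: alternative
-- what changed: Replaces the running if/elif minimum with a group-then-reduce: a first pass collects every distance into per-node lists, a second pass maps min over the groups.
import Mathlib
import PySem

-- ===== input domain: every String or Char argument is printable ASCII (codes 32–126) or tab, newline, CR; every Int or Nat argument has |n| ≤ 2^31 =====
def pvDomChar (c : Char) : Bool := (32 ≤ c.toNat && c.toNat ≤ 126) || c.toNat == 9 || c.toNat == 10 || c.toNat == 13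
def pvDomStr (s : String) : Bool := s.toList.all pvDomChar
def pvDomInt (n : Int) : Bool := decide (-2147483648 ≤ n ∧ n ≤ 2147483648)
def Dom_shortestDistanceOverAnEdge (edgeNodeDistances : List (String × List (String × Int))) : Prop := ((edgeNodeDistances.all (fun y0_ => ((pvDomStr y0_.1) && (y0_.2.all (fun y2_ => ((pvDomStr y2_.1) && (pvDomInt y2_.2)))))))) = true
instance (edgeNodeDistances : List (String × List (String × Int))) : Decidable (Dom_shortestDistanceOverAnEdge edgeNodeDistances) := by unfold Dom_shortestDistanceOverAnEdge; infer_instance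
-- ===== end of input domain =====

-- B replaces A's running if/elif minimum with a group-by-node pass followed by min over each group (alternative decomposition, same cost).

-- ===== PORT A =====
-- the body of A's inner loop: first occurrence inserts, a strictly smaller later value overwrites
def stepA (res : PySem.Dict String Int) (node : String × Int) : PySem.Dict String Int :=
  if res.contains node.1 = false then res.insert node.1 node.2
  else if node.2 < res.getD node.1 0 then res.insert node.1 node.2
  else res

def shortestDistanceOverAnEdge (edgeNodeDistances : List (String × List (String × Int))) : List (String × Int) :=
  (edgeNodeDistances.foldl (fun res edge =>
      ((PySem.Dict.mk edgeNodeDistances).getD edge.1 []).foldl (fun res node =>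
        stepA res (node.1, (PySem.Dict.mk ((PySem.Dict.mk edgeNodeDistances).getD edge.1 [])).getD node.1 0)) res)
    PySem.Dict.empty).items

-- ===== PORT B =====
-- the body of B's grouping loop: groups.setdefault(node, []).append(v)
def stepG (g : PySem.Dict String (List Int)) (node : String × Int) : PySem.Dict String (List Int) :=
  g.modify node.1 [] (fun ds => ds ++ [node.2])

-- min(ds) for a nonempty list (Python's min)
def minD (ds : List Int) : Int := (PySem.List.min? ds (fun y => y)).getD 0

def shortestDistanceOverAnEdge_alt (edgeNodeDistances : List (String × List (String × Int))) : List (String × Int) :=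
  let groups := edgeNodeDistances.foldl (fun g edge =>
      ((PySem.Dict.mk edgeNodeDistances).getD edge.1 []).foldl (fun g node =>
        stepG g (node.1, (PySem.Dict.mk ((PySem.Dict.mk edgeNodeDistances).getD edge.1 [])).getD node.1 0)) g)
    PySem.Dict.empty
  groups.items.map (fun p => (p.1, minD p.2))

-- ===== PRECONDITION & SPEC =====
def Spec_shortestDistanceOverAnEdge (edgeNodeDistances : List (String × List (String × Int))) (out : List (String × Int)) : Prop := out = shortestDistanceOverAnEdge_alt edgeNodeDistances
instance (edgeNodeDistances : List (String × List (String × Int))) (out : List (String × Int)) : Decidable (Spec_shortestDistanceOverAnEdge edgeNodeDistances out) := by unfold Spec_shortestDistanceOverAnEdge; infer_instance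

-- ===== CLAIM (what is proved, stated in full; the proofs are below) =====
def Claim_equal_shortestDistanceOverAnEdge : Prop := ∀ (edgeNodeDistances : List (String × List (String × Int))), Dom_shortestDistanceOverAnEdge edgeNodeDistances → Spec_shortestDistanceOverAnEdge edgeNodeDistances (shortestDistanceOverAnEdge edgeNodeDistances)

-- ===== LEMMAS AND PROOFS =====

-- the common stream of (node, distance) pairs both nested loops consume
def pvStream (l : List (String × List (String × Int))) : List (String × Int) :=
  l.flatMap (fun edge =>
    ((PySem.Dict.mk l).getD edge.1 []).map (fun node =>
      (node.1, (PySem.Dict.mk ((PySem.Dict.mk l).getD edge.1 [])).getD node.1 0)))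

theorem foldl_flatMap' {α β γ : Type} (m : α → List β) (f : γ → β → γ) (l : List α) (s : γ) :
    (l.flatMap m).foldl f s = l.foldl (fun s a => (m a).foldl f s) s := by
  induction l generalizing s with
  | nil => rfl
  | cons a t ih => simp [List.flatMap_cons, List.foldl_append, ih]

theorem A_eq_stream (l : List (String × List (String × Int))) :
    shortestDistanceOverAnEdge l = ((pvStream l).foldl stepA PySem.Dict.empty).items := by
  unfold shortestDistanceOverAnEdge pvStream
  rw [foldl_flatMap']
  simp [List.foldl_map]

theorem B_eq_stream (l : List (String × List (String × Int))) :
    shortestDistanceOverAnEdge_alt l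
      = ((pvStream l).foldl stepG PySem.Dict.empty).items.map (fun p => (p.1, minD p.2)) := by
  unfold shortestDistanceOverAnEdge_alt pvStream
  rw [foldl_flatMap']
  simp [List.foldl_map]

def pvRel (d : PySem.Dict String Int) (g : PySem.Dict String (List Int)) : Prop :=
  g.keys.Nodup ∧ d.items = g.items.map (fun p => (p.1, minD p.2)) ∧ ∀ p ∈ g.items, p.2 ≠ []

theorem minD_singleton (v : Int) : minD [v] = v := by
  simp [minD, PySem.List.min?_id_cons]

theorem minD_append (ds : List Int) (v : Int) (h : ds ≠ []) :
    minD (ds ++ [v]) = min (minD ds) v := by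
  cases ds with
  | nil => exact absurd rfl h
  | cons x t =>
    simp [minD, List.cons_append, PySem.List.min?_id_cons, List.foldl_append]

theorem rel_step (d : PySem.Dict String Int) (g : PySem.Dict String (List Int))
    (x : String × Int) (h : pvRel d g) : pvRel (stepA d x) (stepG g x) := by
  obtain ⟨hnd, hitems, hne⟩ := h
  have hkeys : d.keys = g.keys := by
    simp only [PySem.Dict.keys, hitems, List.map_map]; rfl
  have hdnd : d.keys.Nodup := hkeys ▸ hnd
  have hcont : d.contains x.1 = g.contains x.1 := by
    rw [PySem.Dict.contains_eq_decide_mem_keys, PySem.Dict.contains_eq_decide_mem_keys, hkeys]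
  by_cases hc : g.contains x.1 = true
  · -- node already grouped: unique entry (x.1, ds)
    obtain ⟨ds, hds⟩ : ∃ ds, g.get? x.1 = some ds := by
      have := PySem.Dict.contains_eq_isSome_get? g x.1
      rw [hc] at this
      exact Option.isSome_iff_exists.mp this.symm
    have hmem : (x.1, ds) ∈ g.items := (PySem.Dict.get?_eq_some_iff_mem_items g x.1 ds hnd).mp hds
    have hdsne : ds ≠ [] := hne _ hmem
    have hgetDg : g.getD x.1 [] = ds := PySem.Dict.getD_of_get?_eq_some g [] hds
    have hdmem : (x.1, minD ds) ∈ d.items := by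
      rw [hitems]; exact List.mem_map_of_mem hmem
    have hgetDd : d.getD x.1 0 = minD ds := PySem.Dict.getD_of_mem_items d hdmem hdnd 0
    have huniq : ∀ p ∈ g.items, p.1 = x.1 → p.2 = ds := by
      intro p hp hp1
      have : g.get? x.1 = some p.2 :=
        (PySem.Dict.get?_eq_some_iff_mem_items g x.1 p.2 hnd).mpr (by rw [← hp1]; exact hp)
      rw [hds] at this; exact (Option.some_inj.mp this).symm
    have hG : stepG g x = g.insert x.1 (ds ++ [x.2]) := by
      show g.insert x.1 (g.getD x.1 [] ++ [x.2]) = _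
      rw [hgetDg]
    have hGitems : (stepG g x).items
        = g.items.map (fun p => if (p.1 == x.1) = true then (x.1, ds ++ [x.2]) else p) := by
      rw [hG, PySem.Dict.items_insert_of_contains g _ hc]
    have hGne : ∀ p ∈ (stepG g x).items, p.2 ≠ [] := by
      rw [hGitems]
      intro p hp
      obtain ⟨q, hq, hqe⟩ := List.mem_map.mp hp
      by_cases hq1 : (q.1 == x.1) = true
      · simp only [hq1, if_true] at hqe; rw [← hqe]; simp
      · simp only [hq1] at hqe; rw [← hqe]; exact hne _ hq
    have hGnd : (stepG g x).keys.Nodup := by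
      rw [hG]; exact PySem.Dict.nodup_keys_insert g _ _ hnd
    have hdc : d.contains x.1 = true := by rw [hcont]; exact hc
    refine ⟨hGnd, ?_, hGne⟩
    by_cases hlt : x.2 < minD ds
    · have hA : stepA d x = d.insert x.1 x.2 := by
        simp [stepA, hdc, hgetDd, hlt]
      rw [hA, PySem.Dict.items_insert_of_contains d _ hdc, hGitems, hitems,
          List.map_map, List.map_map]
      refine List.map_congr_left ?_
      intro p hp
      by_cases hp1 : p.1 = x.1
      · have hds2 : p.2 = ds := huniq p hp hp1
        simp only [Function.comp_apply, hp1, beq_self_eq_true, if_true]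
        have hmm : minD (ds ++ [x.2]) = min (minD ds) x.2 := minD_append ds x.2 hdsne
        have hm2 : min (minD ds) x.2 = x.2 := by omega
        simp [hmm, hm2]
      · simp [Function.comp_apply, hp1]
    · have hA : stepA d x = d := by
        simp [stepA, hdc, hgetDd, hlt]
      rw [hA, hGitems, hitems, List.map_map]
      refine List.map_congr_left ?_
      intro p hp
      by_cases hp1 : p.1 = x.1
      · have hds2 : p.2 = ds := huniq p hp hp1
        simp only [Function.comp_apply, hp1, beq_self_eq_true, if_true]
        have hmm : minD (ds ++ [x.2]) = min (minD ds) x.2 := minD_append ds x.2 hdsne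
        have hm2 : min (minD ds) x.2 = minD ds := by omega
        simp [hds2, hmm, hm2]
      · simp [Function.comp_apply, hp1]
  · -- fresh node
    have hc' : g.contains x.1 = false := by simpa using hc
    have hdc : d.contains x.1 = false := by rw [hcont]; exact hc'
    have hG : stepG g x = g.insert x.1 [x.2] := by
      show g.insert x.1 (g.getD x.1 [] ++ [x.2]) = _
      rw [PySem.Dict.getD_of_not_contains g [] hc']; rfl
    have hA : stepA d x = d.insert x.1 x.2 := by simp [stepA, hdc]
    refine ⟨?_, ?_, ?_⟩
    · rw [hG]; exact PySem.Dict.nodup_keys_insert g _ _ hnd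
    · rw [hA, hG, PySem.Dict.items_insert_of_not_contains d _ hdc,
          PySem.Dict.items_insert_of_not_contains g _ hc', List.map_append, hitems]
      simp [minD_singleton]
    · rw [hG, PySem.Dict.items_insert_of_not_contains g _ hc']
      intro p hp
      rcases List.mem_append.mp hp with h1 | h1
      · exact hne _ h1
      · simp at h1; rw [h1]; simp

theorem rel_foldl (ps : List (String × Int)) (d : PySem.Dict String Int)
    (g : PySem.Dict String (List Int)) (h : pvRel d g) :
    pvRel (ps.foldl stepA d) (ps.foldl stepG g) := by
  induction ps generalizing d g with
  | nil => exact h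
  | cons x t ih => exact ih _ _ (rel_step d g x h)

-- ===== VERDICT (by name: the statement is the Claim_ definition above) =====
theorem shortestDistanceOverAnEdge_spec : Claim_equal_shortestDistanceOverAnEdge := by
  intro l _
  unfold Spec_shortestDistanceOverAnEdge
  rw [A_eq_stream, B_eq_stream]
  exact (rel_foldl (pvStream l) PySem.Dict.empty PySem.Dict.empty ⟨by simp [PySem.Dict.empty], rfl, by simp [PySem.Dict.empty]⟩).2.1
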